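-- pv_equiv track=rewrite | github.com/Subhayan18/TissueBERT_analysis | step_1_data_preparation/step1.3/step1.3_extract_sequences_and_tokenize.py | dna_to_3mer
-- ===== SOURCE A (Python) =====
-- def dna_to_3mer(sequence):
--     """
--     Convert DNA sequence to 3-mer tokens for DNABERT.
--
--     Example:
--         ATCGATCG -> ATC TCG CGA GAT ATC TCG
--
--     Args:
--         sequence: DNA sequence string
--
--     Returns:
--         Space-separated 3-mer string
--     """
--     if len(sequence) < 3:
--         return ""
--
--     kmers = []
--     k = 3
--     for i in range(len(sequence) - k + 1):
--         kmer = sequence[i:i+k]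
--         # Only include kmers with valid nucleotides
--         if all(base in 'ATCG' for base in kmer):
--             kmers.append(kmer)
--
--     return ' '.join(kmers)
-- ===== SOURCE B (Python) =====
-- def dna_to_3mer(sequence):
--     """Tokenize DNA into valid 3-mers, space-joined: split into maximal runs of
--     valid bases, then emit each run's overlapping 3-mers."""
--     kmers = []
--     run = ""
--     for ch in sequence:
--         if ch in 'ATCG':
--             run += ch
--         else:
--             kmers.extend(run[i:i+3] for i in range(len(run) - 2))
--             run = ""
--     kmers.extend(run[i:i+3] for i in range(len(run) - 2))
--     return ' '.join(kmers)
-- ===== Notes on version B (the rewrite author's own statement) =====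
-- stated objective: alternative
-- what changed: B partitions the sequence into maximal runs of valid ATCG bases and emits each run's overlapping 3-mers directly, instead of A's scan that slices every length-3 window and validity-tests each of its characters.
import Mathlib
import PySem

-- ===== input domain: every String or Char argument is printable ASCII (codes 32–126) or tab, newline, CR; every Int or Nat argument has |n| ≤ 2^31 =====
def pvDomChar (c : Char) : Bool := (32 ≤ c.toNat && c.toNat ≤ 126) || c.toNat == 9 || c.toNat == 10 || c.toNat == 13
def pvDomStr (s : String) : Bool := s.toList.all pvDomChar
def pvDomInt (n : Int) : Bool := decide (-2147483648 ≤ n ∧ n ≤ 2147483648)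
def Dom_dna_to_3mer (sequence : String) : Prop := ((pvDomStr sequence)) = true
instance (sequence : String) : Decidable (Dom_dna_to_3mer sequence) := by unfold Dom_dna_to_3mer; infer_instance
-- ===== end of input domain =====

-- B splits the sequence into maximal runs of valid bases and emits each run's overlapping
-- 3-mers, instead of testing every length-3 window for validity (objective: alternative).

-- shared trivial helper: Python's `c in 'ATCG'` for a single character c
def pvIsBase (c : Char) : Bool := PySem.Chars.isIn [c] "ATCG".toList

-- ===== PORT A =====
def dna_to_3mer (sequence : String) : String :=
  if PySem.Str.len sequence < 3 then "" else
  String.ofList (PySem.Chars.join [' ']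
    ((PySem.List.pyRange 0 ((PySem.Str.len sequence : Int) - 3 + 1) 1).foldl
      (fun acc i =>
        let kmer := PySem.Chars.slice sequence.toList (some i) (some (i + 3))
        if kmer.all (fun base => pvIsBase base) then acc ++ [kmer] else acc) []))

-- ===== PORT B =====
-- `[run[i:i+3] for i in range(len(run) - 2)]`
def pvRunKmers (run : List Char) : List (List Char) :=
  (PySem.List.pyRange 0 ((run.length : Int) - 2) 1).foldl
    (fun acc i => acc ++ [PySem.Chars.slice run (some i) (some (i + 3))]) []

-- B's for-loop; the state is the pair (kmers, run)
def pvBLoop : List (List Char) × List Char → List Char → List (List Char) × List Char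
  | st, [] => st
  | (kmers, run), ch :: rest =>
      if pvIsBase ch
      then pvBLoop (kmers, run ++ [ch]) rest
      else pvBLoop (kmers ++ pvRunKmers run, []) rest

def dna_to_3mer_alt (sequence : String) : String :=
  String.ofList (PySem.Chars.join [' ']
    ((pvBLoop ([], []) sequence.toList).1 ++ pvRunKmers (pvBLoop ([], []) sequence.toList).2))

-- ===== PRECONDITION & SPEC =====
def Spec_dna_to_3mer (sequence : String) (out : String) : Prop := out = dna_to_3mer_alt sequence
instance (sequence : String) (out : String) : Decidable (Spec_dna_to_3mer sequence out) := by unfold Spec_dna_to_3mer; infer_instance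

-- ===== CLAIM (what is proved, stated in full; the proofs are below) =====
def Claim_equal_dna_to_3mer : Prop := ∀ (sequence : String), Dom_dna_to_3mer sequence → Spec_dna_to_3mer sequence (dna_to_3mer sequence)

-- ===== LEMMAS AND PROOFS =====

-- reference: the valid 3-mers of cs, structurally
def pvK3 : List Char → List (List Char)
  | [] => []
  | a :: rest =>
    match rest with
    | b :: c :: _ => (if pvIsBase a && pvIsBase b && pvIsBase c then [[a, b, c]] else []) ++ pvK3 rest
    | _ => []

-- reference: all 3-mers of cs, structurally
def pvW3 : List Char → List (List Char)
  | [] => []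
  | a :: rest =>
    match rest with
    | b :: c :: _ => [a, b, c] :: pvW3 rest
    | _ => []

lemma pvK3_cons3 (a b c : Char) (r : List Char) :
    pvK3 (a :: b :: c :: r)
      = (if pvIsBase a && pvIsBase b && pvIsBase c then [[a, b, c]] else []) ++ pvK3 (b :: c :: r) := rfl

lemma pvW3_cons3 (a b c : Char) (r : List Char) :
    pvW3 (a :: b :: c :: r) = [a, b, c] :: pvW3 (b :: c :: r) := rfl

-- the window/valid-window selectors of the index formulations
def pvFW (cs : List Char) (i : Nat) : List Char := (cs.drop i).take 3

def pvFK (cs : List Char) (i : Nat) : Option (List Char) :=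
  if (pvFW cs i).all pvIsBase then some (pvFW cs i) else none

lemma pvFW_succ (a : Char) (cs : List Char) : pvFW (a :: cs) ∘ Nat.succ = pvFW cs := rfl

lemma pvFK_succ (a : Char) (cs : List Char) : pvFK (a :: cs) ∘ Nat.succ = pvFK cs := rfl

-- A's fold over range m collects the valid windows among the first m
lemma pv_foldA (cs : List Char) (m : Nat) (init : List (List Char)) :
    (PySem.List.pyRange 0 (m : Int) 1).foldl
      (fun acc i =>
        let kmer := PySem.Chars.slice cs (some i) (some (i + 3))
        if kmer.all (fun base => pvIsBase base) then acc ++ [kmer] else acc) init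
    = init ++ (List.range m).filterMap (pvFK cs) := by
  rw [PySem.List.pyRange_zero_natCast]
  induction m generalizing init with
  | zero => simp
  | succ n ih =>
    rw [List.range_succ]
    simp only [List.map_append, List.foldl_append, ih, List.filterMap_append,
      List.map_cons, List.map_nil, List.foldl_cons, List.foldl_nil,
      List.filterMap_cons, List.filterMap_nil]
    have hsl : PySem.Chars.slice cs (some ((n : Nat) : Int)) (some (((n : Nat) : Int) + 3))
        = (cs.drop n).take 3 := by
      have := PySem.List.slice_natCast_add cs n 3
      simpa using this
    simp only [hsl]
    split_ifs with hv
    · simp [pvFK, pvFW, hv]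
    · simp [pvFK, pvFW, hv]

-- B's per-run fold collects all windows
lemma pv_foldB (run : List Char) :
    pvRunKmers run = (List.range (run.length - 2)).map (pvFW run) := by
  unfold pvRunKmers
  match run with
  | [] => rfl
  | [x] => rfl
  | x :: y :: t =>
    have hcast : ((x :: y :: t).length : Int) - 2 = (((x :: y :: t).length - 2 : Nat) : Int) := by
      simp only [List.length_cons]; omega
    rw [hcast, PySem.List.pyRange_zero_natCast]
    generalize (x :: y :: t) = cs
    generalize (cs.length - 2) = m
    induction m with
    | zero => simp
    | succ n ih =>
      rw [List.range_succ]
      simp only [List.map_append, List.foldl_append, List.map_cons, List.map_nil,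
        List.foldl_cons, List.foldl_nil, ih]
      have hsl : PySem.Chars.slice cs (some ((n : Nat) : Int)) (some (((n : Nat) : Int) + 3))
          = (cs.drop n).take 3 := by
        have := PySem.List.slice_natCast_add cs n 3
        simpa using this
      simp only [hsl]
      simp [pvFW]

lemma pv_all3 (a b c : Char) :
    ([a, b, c]).all pvIsBase = (pvIsBase a && pvIsBase b && pvIsBase c) := by
  simp [List.all_cons, Bool.and_assoc]

lemma pv_winsF_eq_K3 (cs : List Char) :
    (List.range (cs.length - 2)).filterMap (pvFK cs) = pvK3 cs := by
  induction cs with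
  | nil => rfl
  | cons a rest ih =>
    match rest with
    | [] => rfl
    | [b] => rfl
    | b :: c :: r =>
      have hl : (a :: b :: c :: r).length - 2 = r.length + 1 := by
        simp only [List.length_cons]; omega
      have hl' : (b :: c :: r).length - 2 = r.length := by
        simp only [List.length_cons]; omega
      rw [hl' ] at ih
      rw [hl, List.range_succ_eq_map, List.filterMap_cons, List.filterMap_map, pvFK_succ, ih]
      have h0 : pvFK (a :: b :: c :: r) 0
          = (if pvIsBase a && pvIsBase b && pvIsBase c then some [a, b, c] else none) := by
        simp only [pvFK, pvFW, List.drop_zero]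
        rw [show (List.take 3 (a :: b :: c :: r)) = [a, b, c] from rfl, pv_all3]
      rw [h0, pvK3_cons3]
      split_ifs <;> simp

lemma pv_wins_eq_W3 (cs : List Char) :
    (List.range (cs.length - 2)).map (pvFW cs) = pvW3 cs := by
  induction cs with
  | nil => rfl
  | cons a rest ih =>
    match rest with
    | [] => rfl
    | [b] => rfl
    | b :: c :: r =>
      have hl : (a :: b :: c :: r).length - 2 = r.length + 1 := by
        simp only [List.length_cons]; omega
      have hl' : (b :: c :: r).length - 2 = r.length := by
        simp only [List.length_cons]; omega
      rw [hl'] at ih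
      rw [hl, List.range_succ_eq_map, List.map_cons, List.map_map, pvFW_succ, ih, pvW3_cons3]
      rfl

lemma pv_K3_short (cs : List Char) (h : cs.length < 3) : pvK3 cs = [] := by
  match cs with
  | [] => rfl
  | [a] => rfl
  | [a, b] => rfl
  | a :: b :: c :: r => simp only [List.length_cons] at h; omega

lemma pv_K3_eq_W3_of_valid (cs : List Char) (h : cs.all pvIsBase) : pvK3 cs = pvW3 cs := by
  induction cs with
  | nil => rfl
  | cons a rest ih =>
    match rest with
    | [] => rfl
    | [b] => rfl
    | b :: c :: r =>
      simp only [List.all_cons, Bool.and_eq_true] at h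
      obtain ⟨ha, hb, hc, hr⟩ := h
      have hrest : (b :: c :: r).all pvIsBase = true := by
        simp [List.all_cons, hb, hc, hr]
      rw [pvK3_cons3, pvW3_cons3, ih hrest, ha, hb, hc]
      simp

lemma pv_K3_cons_invalid (c : Char) (ys : List Char) (hc : pvIsBase c = false) :
    pvK3 (c :: ys) = pvK3 ys := by
  match ys with
  | [] => rfl
  | [b] => rfl
  | b :: d :: r => rw [pvK3_cons3, hc]; simp

lemma pv_K3_split (run : List Char) (c : Char) (ys : List Char)
    (hr : run.all pvIsBase) (hc : pvIsBase c = false) :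
    pvK3 (run ++ c :: ys) = pvW3 run ++ pvK3 ys := by
  induction run with
  | nil => simpa using pv_K3_cons_invalid c ys hc
  | cons a t ih =>
    simp only [List.all_cons, Bool.and_eq_true] at hr
    obtain ⟨ha, ht⟩ := hr
    match t with
    | [] =>
      match ys with
      | [] => rfl
      | y :: ys' =>
        simp only [List.singleton_append]
        rw [pvK3_cons3, hc]
        rw [pv_K3_cons_invalid c (y :: ys') hc]
        simp [pvW3]
    | [b] =>
      have h2 := ih ht
      simp only [List.singleton_append] at h2
      simp only [List.cons_append, List.nil_append]
      rw [pvK3_cons3, hc, h2]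
      simp [pvW3]
    | b :: d :: t'' =>
      have h2 := ih ht
      simp only [List.all_cons, Bool.and_eq_true] at ht
      simp only [List.cons_append] at h2 ⊢
      rw [pvK3_cons3, pvW3_cons3, ha, ht.1, ht.2.1, h2]
      simp

lemma pvBLoop_nil (st : List (List Char) × List Char) : pvBLoop st [] = st := rfl

lemma pvBLoop_cons (kmers : List (List Char)) (run : List Char) (ch : Char) (rest : List Char) :
    pvBLoop (kmers, run) (ch :: rest)
      = if pvIsBase ch
        then pvBLoop (kmers, run ++ [ch]) rest
        else pvBLoop (kmers ++ pvRunKmers run, []) rest := rfl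

lemma pv_bloop (cs : List Char) : ∀ (ks : List (List Char)) (run : List Char),
    run.all pvIsBase →
    (pvBLoop (ks, run) cs).1 ++ pvRunKmers (pvBLoop (ks, run) cs).2
      = ks ++ pvK3 (run ++ cs) := by
  induction cs with
  | nil =>
    intro ks run h
    rw [pvBLoop_nil]
    simp [pv_foldB, pv_wins_eq_W3, pv_K3_eq_W3_of_valid run h]
  | cons ch rest ih =>
    intro ks run h
    rw [pvBLoop_cons]
    by_cases hch : pvIsBase ch = true
    · rw [if_pos hch]
      have hall : (run ++ [ch]).all pvIsBase := by simp [List.all_append, h, hch]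
      rw [ih ks (run ++ [ch]) hall]
      simp
    · rw [if_neg hch]
      have hch' : pvIsBase ch = false := by simpa using hch
      rw [ih (ks ++ pvRunKmers run) [] rfl]
      rw [pv_foldB, pv_wins_eq_W3, pv_K3_split run ch rest h hch']
      simp

lemma pv_alt_eq (sequence : String) :
    dna_to_3mer_alt sequence = String.ofList (PySem.Chars.join [' '] (pvK3 sequence.toList)) := by
  unfold dna_to_3mer_alt
  have := pv_bloop sequence.toList [] [] rfl
  simp only [List.nil_append] at this
  rw [this]

lemma pv_a_eq (sequence : String) :
    dna_to_3mer sequence = String.ofList (PySem.Chars.join [' '] (pvK3 sequence.toList)) := by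
  unfold dna_to_3mer
  by_cases h : PySem.Str.len sequence < 3
  · rw [if_pos h]
    have hlen : sequence.toList.length < 3 := by
      rw [PySem.Str.len_eq] at h; exact_mod_cast h
    rw [pv_K3_short _ hlen]
    rfl
  · rw [if_neg h]
    have hlen : 3 ≤ sequence.toList.length := by
      rw [PySem.Str.len_eq] at h; omega
    have hcast : (PySem.Str.len sequence : Int) - 3 + 1
        = ((sequence.toList.length - 2 : Nat) : Int) := by
      rw [PySem.Str.len_eq]; omega
    rw [hcast, pv_foldA, pv_winsF_eq_K3]
    simp

-- ===== VERDICT (by name: the statement is the Claim_ definition above) =====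
theorem dna_to_3mer_spec : Claim_equal_dna_to_3mer := by
  intro s _
  unfold Spec_dna_to_3mer
  rw [pv_a_eq, pv_alt_eq]
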